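-- pv_equiv track=rewrite | github.com/miliar/Code_Jam_Webscraper | solutions_python/solutions_year17_round0_nr2/552.py | list2text
-- ===== SOURCE A (Python) =====
-- def list2text(list):
--   result = "";
--   for i in list:
--     if(result != "" or i!=0):
--       result += str(i)
--   if(result == ""):
--     result = "0";
--   return result
-- ===== SOURCE B (Python) =====
-- def list2text(list):
--     for idx, x in enumerate(list):
--         if x != 0:
--             return "".join(str(v) for v in list[idx:])
--     return "0"
-- ===== Notes on version B (the rewrite author's own statement) =====
-- stated objective: simpler
-- what changed: Replaces the flag-driven string accumulation loop by a two-phase boundary find: locate the first nonzero element, then join str() of the suffix from there (returning "0" when none exists).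
import Mathlib
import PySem

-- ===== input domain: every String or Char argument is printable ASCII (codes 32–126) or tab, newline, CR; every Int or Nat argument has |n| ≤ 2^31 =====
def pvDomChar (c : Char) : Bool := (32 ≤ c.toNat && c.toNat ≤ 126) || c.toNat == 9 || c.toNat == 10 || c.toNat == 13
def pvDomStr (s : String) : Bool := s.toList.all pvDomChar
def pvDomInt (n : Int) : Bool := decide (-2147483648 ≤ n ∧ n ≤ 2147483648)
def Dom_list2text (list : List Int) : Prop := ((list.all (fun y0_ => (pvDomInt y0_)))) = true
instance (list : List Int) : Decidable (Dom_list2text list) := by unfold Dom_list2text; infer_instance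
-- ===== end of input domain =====

-- B replaces A's flag-driven accumulation loop by a boundary find (first nonzero element)
-- followed by a join of the suffix; objective: simpler.


-- ===== PORT A =====
-- strings are ported on the List Char side (PySem convention); '+=' is list append
def list2text (list : List Int) : String :=
  let result := list.foldl
    (fun (result : List Char) (i : Int) =>
      if result ≠ [] ∨ i ≠ 0 then result ++ PySem.Int.toChars i else result) []
  if result = [] then "0" else String.ofList result

-- ===== PORT B =====
-- the enumerate-scan of Source B: skip leading zeros, return the suffix from the first nonzero
def altScan : List Int → Option (List Int)
  | [] => none
  | x :: xs => if x ≠ 0 then some (x :: xs) else altScan xs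

def list2text_alt (list : List Int) : String :=
  match altScan list with
  | none => "0"
  | some rest => String.ofList (rest.flatMap PySem.Int.toChars)

-- ===== PRECONDITION & SPEC =====
def Spec_list2text (list : List Int) (out : String) : Prop := out = list2text_alt list
instance (list : List Int) (out : String) : Decidable (Spec_list2text list out) := by unfold Spec_list2text; infer_instance

-- ===== CLAIM (what is proved, stated in full; the proofs are below) =====
def Claim_equal_list2text : Prop := ∀ (list : List Int), Dom_list2text list → Spec_list2text list (list2text list)

-- ===== LEMMAS AND PROOFS =====

theorem toChars_ne_nil (n : Int) : PySem.Int.toChars n ≠ [] := by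
  unfold PySem.Int.toChars
  split
  · simp
  · have : 0 < (Nat.toDigits 10 n.toNat).length := Nat.length_toDigits_pos
    intro h; simp [h] at this

-- once the accumulator is nonempty, A appends every remaining element
theorem foldl_nonempty (l : List Int) (s : List Char) (hs : s ≠ []) :
    l.foldl (fun (result : List Char) (i : Int) =>
      if result ≠ [] ∨ i ≠ 0 then result ++ PySem.Int.toChars i else result) s
    = s ++ l.flatMap PySem.Int.toChars := by
  induction l generalizing s with
  | nil => simp
  | cons x xs ih =>
    simp only [List.foldl_cons, List.flatMap_cons]
    rw [if_pos (Or.inl hs), ih _ (by simp [hs]), List.append_assoc]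

theorem main_eq (l : List Int) : list2text l = list2text_alt l := by
  induction l with
  | nil => rfl
  | cons x xs ih =>
    by_cases hx : x = 0
    · subst hx
      simpa [list2text, list2text_alt, altScan] using ih
    · simp only [list2text, list2text_alt, altScan, List.foldl_cons, if_pos hx,
        if_pos (Or.inr hx), List.nil_append]
      rw [foldl_nonempty xs (PySem.Int.toChars x) (toChars_ne_nil x)]
      simp [toChars_ne_nil x]

theorem list2text_spec : Claim_equal_list2text := by
  intro l _
  exact main_eq l
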